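-- pv_equiv track=rewrite | github.com/pynathanthomas/tagger | tagger.py | frameshift_match
-- ===== SOURCE A (Python) =====
-- def frameshift_match(first, second, forgive=2):
--     first, second = list(first.lower()), list(second.lower())
--     errors = 0
--     not_matched = True
--     i = 0
--     while True:
--         if i > len(second) - 1 or i > len(first) - 1:
--             break
--
--         if first[i] != second[i]:
--             errors += 1
--             longer = first if len(first) > len(second) else second
--             longer.pop(i)
--             i -= 1
--         if errors > forgive:
--             return False
--
--         if first == second:
--             return True
--
--         i += 1
--     longer = first if len(first) > len(second) else second
--     shorter = first if len(first) < len(second) else second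
--     # if the longer one has excess that can be forgiven
--     if (
--         longer[: len(shorter)] == shorter
--         and errors + (len(longer) - len(shorter)) <= forgive
--     ):
--         return True
-- ===== SOURCE B (Python) =====
-- def frameshift_match(first, second, forgive=2):
--     f = first.lower()
--     s = second.lower()
--     i = j = 0
--     errors = 0
--     while i < len(f) and j < len(s):
--         if f[i] == s[j]:
--             i += 1
--             j += 1
--         else:
--             errors += 1
--             if errors > forgive:
--                 return False
--             if len(f) - i > len(s) - j:
--                 i += 1
--             else:
--                 j += 1
--     if errors + (len(f) - i) + (len(s) - j) <= forgive:
--         return True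
--     return None
-- ===== Notes on version B (the rewrite author's own statement) =====
-- stated objective: faster
-- what changed: A repeatedly mutates the lists (list.pop at an index, re-slicing) and compares the two whole lists for equality on every loop iteration (O(n^2)); B is a single two-pointer linear pass that skips one character of the currently-longer remainder on each mismatch and does one O(1) arithmetic check at the end.
-- intended difference: When forgive < 0, both strings are nonempty and one lowercased string is a prefix of the other (e.g. two identical strings), A returns False although A's own no-match result is None; B returns None there, the intended no-decision value for a budget that can never be satisfied. — e.g. on frameshift_match("a", "a", -1): A returns some false, B returns none
import Mathlib
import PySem

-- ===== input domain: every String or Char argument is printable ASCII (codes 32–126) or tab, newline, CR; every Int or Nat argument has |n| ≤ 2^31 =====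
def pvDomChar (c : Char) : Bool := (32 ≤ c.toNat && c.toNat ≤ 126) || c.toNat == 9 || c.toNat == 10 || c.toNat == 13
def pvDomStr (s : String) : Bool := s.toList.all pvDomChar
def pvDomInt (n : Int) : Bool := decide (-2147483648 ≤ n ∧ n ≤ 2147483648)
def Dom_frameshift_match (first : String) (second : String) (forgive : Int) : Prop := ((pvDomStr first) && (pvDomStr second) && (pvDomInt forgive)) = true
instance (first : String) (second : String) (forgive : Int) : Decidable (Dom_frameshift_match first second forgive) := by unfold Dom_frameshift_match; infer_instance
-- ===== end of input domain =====

-- B replaces A's quadratic mutate-and-recompare loop (list.pop at an index plus a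
-- full-list equality test every iteration) by a single two-pointer pass; on the
-- degenerate corner described at D_ below (forgive < 0) B returns None where A
-- returns False.

-- ===== PORT A =====
-- code after A's `while` loop (the two final `longer`/`shorter` lines and the big `if`)
def frameshiftFinalA (f s : List Char) (errors forgive : Int) : Option Bool :=
  let longer := if f.length > s.length then f else s
  let shorter := if f.length < s.length then f else s
  if longer.take shorter.length = shorter ∧
      errors + ((longer.length : Int) - (shorter.length : Int)) ≤ forgive then some true
  else none

-- A's `while True` loop. Python's i starts at 0 and never goes below 0 (the `i -= 1`
-- is always followed by `i += 1`), so it is ported as a Nat and the trailing `i += 1`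
-- is folded into each recursive call: the mismatch branch recurses at (i-1)+1 = i, the
-- other at i+1.  `longer.pop(i)` (index always in range here, so exact) is eraseIdx i.
def frameshiftLoopA : Nat → List Char → List Char → Int → Nat → Int → Option Bool
  | 0, f, s, errors, _i, forgive => frameshiftFinalA f s errors forgive  -- fuel guard only; never reached from the entry call
  | fuel + 1, f, s, errors, i, forgive =>
    if (i : Int) > (s.length : Int) - 1 ∨ (i : Int) > (f.length : Int) - 1 then
      frameshiftFinalA f s errors forgive
    else if f[i]? ≠ s[i]? then
      -- errors += 1; longer = first if … else second; longer.pop(i); i -= 1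
      let p := if f.length > s.length then (f.eraseIdx i, s) else (f, s.eraseIdx i)
      if errors + 1 > forgive then some false
      else if p.1 = p.2 then some true
      else frameshiftLoopA fuel p.1 p.2 (errors + 1) i forgive
    else if errors > forgive then some false
    else if f = s then some true
    else frameshiftLoopA fuel f s errors (i + 1) forgive

def frameshift_match (first : String) (second : String) (forgive : Int) : Option Bool :=
  frameshiftLoopA ((PySem.Str.lower first).toList.length + (PySem.Str.lower second).toList.length + 1)
    (PySem.Str.lower first).toList (PySem.Str.lower second).toList 0 0 forgive

-- ===== PORT B =====
-- B's single two-pointer pass (Source B): i walks f, j walks s.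
def frameshiftLoopB : Nat → List Char → List Char → Nat → Nat → Int → Int → Option Bool
  | 0, f, s, i, j, errors, forgive =>  -- fuel guard only; never reached from the entry call
    if errors + ((f.length - i : Nat) : Int) + ((s.length - j : Nat) : Int) ≤ forgive then some true else none
  | fuel + 1, f, s, i, j, errors, forgive =>
    if i < f.length ∧ j < s.length then
      if f[i]? = s[j]? then frameshiftLoopB fuel f s (i + 1) (j + 1) errors forgive
      else if errors + 1 > forgive then some false
      else if f.length - i > s.length - j then frameshiftLoopB fuel f s (i + 1) j (errors + 1) forgive
      else frameshiftLoopB fuel f s i (j + 1) (errors + 1) forgive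
    else if errors + ((f.length - i : Nat) : Int) + ((s.length - j : Nat) : Int) ≤ forgive then some true
    else none

def frameshift_match_alt (first : String) (second : String) (forgive : Int) : Option Bool :=
  frameshiftLoopB ((PySem.Str.lower first).toList.length + (PySem.Str.lower second).toList.length)
    (PySem.Str.lower first).toList (PySem.Str.lower second).toList 0 0 0 forgive

-- ===== PRECONDITION & SPEC =====
-- When forgive < 0, both strings are nonempty and one lowercased string is a prefix of
-- the other (e.g. two equal strings), A returns False even though A's own "no match"
-- result is None; B uniformly returns None there, the intended no-decision value for a
-- budget that can never be satisfied.
def D_frameshift_match (first : String) (second : String) (forgive : Int) : Prop :=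
  forgive < 0 ∧ first ≠ "" ∧ second ≠ "" ∧
    ((PySem.Str.lower first).toList <+: (PySem.Str.lower second).toList ∨
     (PySem.Str.lower second).toList <+: (PySem.Str.lower first).toList)
instance (first : String) (second : String) (forgive : Int) : Decidable (D_frameshift_match first second forgive) := by unfold D_frameshift_match; infer_instance

def Spec_frameshift_match (first : String) (second : String) (forgive : Int) (out : Option Bool) : Prop := ¬ D_frameshift_match first second forgive → out = frameshift_match_alt first second forgive
instance (first : String) (second : String) (forgive : Int) (out : Option Bool) : Decidable (Spec_frameshift_match first second forgive out) := by unfold Spec_frameshift_match; infer_instance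

def pvDiffWitness_frameshift_match : String × String × Int := ("a", "a", -1)
def pvDiffWitnessOut_frameshift_match : (Option Bool) × (Option Bool) := (some false, none)

-- ===== CLAIM (what is proved, stated in full; the proofs are below) =====
def Claim_unchanged_frameshift_match : Prop := ∀ (first : String) (second : String) (forgive : Int), Dom_frameshift_match first second forgive → Spec_frameshift_match first second forgive (frameshift_match first second forgive)
def Claim_changed_frameshift_match : Prop := Dom_frameshift_match (pvDiffWitness_frameshift_match.1) (pvDiffWitness_frameshift_match.2.1) (pvDiffWitness_frameshift_match.2.2) ∧ D_frameshift_match (pvDiffWitness_frameshift_match.1) (pvDiffWitness_frameshift_match.2.1) (pvDiffWitness_frameshift_match.2.2) ∧ frameshift_match (pvDiffWitness_frameshift_match.1) (pvDiffWitness_frameshift_match.2.1) (pvDiffWitness_frameshift_match.2.2) = pvDiffWitnessOut_frameshift_match.1 ∧ frameshift_match_alt (pvDiffWitness_frameshift_match.1) (pvDiffWitness_frameshift_match.2.1) (pvDiffWitness_frameshift_match.2.2) = pvDiffWitnessOut_frameshift_match.2 ∧ pvDiffWitnessOut_frameshift_match.1 ≠ pvDiffWitnessOut_frameshift_match.2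
def Claim_exact_frameshift_match : Prop := ∀ (first : String) (second : String) (forgive : Int), Dom_frameshift_match first second forgive → D_frameshift_match first second forgive → frameshift_match first second forgive ≠ frameshift_match_alt first second forgive

-- ===== LEMMAS AND PROOFS =====

-- reference recursion on the dropped suffixes: loopB only ever looks at f.drop i / s.drop j
def goB : List Char → List Char → Int → Int → Option Bool
  | [], b, e, fo => if e + ((0 : Nat) : Int) + (b.length : Int) ≤ fo then some true else none
  | x :: as, [], e, fo => if e + ((x :: as).length : Int) + ((0 : Nat) : Int) ≤ fo then some true else none
  | x :: as, y :: bs, e, fo =>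
    if x = y then goB as bs e fo
    else if e + 1 > fo then some false
    else if as.length + 1 > bs.length + 1 then goB as (y :: bs) (e + 1) fo
    else goB (x :: as) bs (e + 1) fo
termination_by a b => a.length + b.length
decreasing_by all_goals simp <;> omega

lemma goB_not_both (a b : List Char) (e fo : Int) (h : a = [] ∨ b = []) :
    goB a b e fo = if e + (a.length : Int) + (b.length : Int) ≤ fo then some true else none := by
  rcases h with h | h
  · subst h; cases b <;> rw [goB] <;> simp
  · subst h; cases a <;> rw [goB] <;> simp

lemma loopB_eq_goB (fo : Int) : ∀ fuel f s i j e, (f.length - i) + (s.length - j) ≤ fuel →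
    frameshiftLoopB fuel f s i j e fo = goB (f.drop i) (s.drop j) e fo := by
  intro fuel
  induction fuel with
  | zero =>
    intro f s i j e hn
    have h1 : (f.drop i).length = f.length - i := List.length_drop ..
    have h2 : (s.drop j).length = s.length - j := List.length_drop ..
    rw [frameshiftLoopB,
      goB_not_both _ _ _ _ (by rw [← List.length_eq_zero_iff, ← List.length_eq_zero_iff]; omega)]
    rw [h1, h2]
  | succ fuel ih =>
    intro f s i j e hn
    rw [frameshiftLoopB]
    by_cases hg : i < f.length ∧ j < s.length
    · obtain ⟨hi, hj⟩ := hg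
      rw [if_pos (show i < f.length ∧ j < s.length from ⟨hi, hj⟩)]
      rw [List.drop_eq_getElem_cons hi, List.drop_eq_getElem_cons hj, goB]
      have hlf : (f.drop (i+1)).length = f.length - (i+1) := List.length_drop ..
      have hls : (s.drop (j+1)).length = s.length - (j+1) := List.length_drop ..
      rw [List.getElem?_eq_getElem hi, List.getElem?_eq_getElem hj]
      by_cases he : f[i]'hi = s[j]'hj
      · rw [if_pos (by rw [he]), if_pos he]
        exact ih f s (i+1) (j+1) e (by omega)
      · rw [if_neg (by simpa using he), if_neg he]
        by_cases hb : e + 1 > fo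
        · rw [if_pos hb, if_pos hb]
        · rw [if_neg hb, if_neg hb]
          have hcmp : (f.length - i > s.length - j) ↔
              ((f.drop (i+1)).length + 1 > (s.drop (j+1)).length + 1) := by
            rw [hlf, hls]; omega
          by_cases hc : f.length - i > s.length - j
          · rw [if_pos hc, if_pos (hcmp.mp hc), ← List.drop_eq_getElem_cons hj]
            exact ih f s (i+1) j (e+1) (by omega)
          · rw [if_neg hc, if_neg (fun h => hc (hcmp.mpr h)), ← List.drop_eq_getElem_cons hi]
            exact ih f s i (j+1) (e+1) (by omega)
    · rw [if_neg hg]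
      have h1 : (f.drop i).length = f.length - i := List.length_drop ..
      have h2 : (s.drop j).length = s.length - j := List.length_drop ..
      rw [goB_not_both _ _ _ _ (by rw [← List.length_eq_zero_iff, ← List.length_eq_zero_iff]; omega)]
      rw [h1, h2]

-- goB returns True on two equal suffixes within budget
lemma goB_self (fo : Int) : ∀ (a : List Char) (e : Int), e ≤ fo → goB a a e fo = some true := by
  intro a
  induction a with
  | nil => intro e he; rw [goB]; simp; omega
  | cons x as ih => intro e he; rw [goB, if_pos rfl]; exact ih e he

-- budget already blown, suffixes prefix-related: goB walks to an end and returns none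
lemma goB_pref (fo : Int) : ∀ n (a b : List Char) (e : Int), a.length + b.length = n →
    fo < e → (a <+: b ∨ b <+: a) → goB a b e fo = none := by
  intro n
  induction n using Nat.strong_induction_on with
  | _ n ih =>
    intro a b e hn hfo hp
    match a, b with
    | [], b => rw [goB]; simp; omega
    | x :: as, [] => rw [goB]; simp; omega
    | x :: as, y :: bs =>
      have hxy : x = y ∧ (as <+: bs ∨ bs <+: as) := by
        rcases hp with h | h <;> rw [List.cons_prefix_cons] at h <;> tauto
      rw [goB, if_pos hxy.1]
      exact ih _ (by simp at hn; omega) as bs e rfl hfo hxy.2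

-- budget already blown, suffixes not prefix-related: goB hits a mismatch and returns False
lemma goB_nopref (fo : Int) : ∀ n (a b : List Char) (e : Int), a.length + b.length = n →
    fo < e → ¬(a <+: b ∨ b <+: a) → goB a b e fo = some false := by
  intro n
  induction n using Nat.strong_induction_on with
  | _ n ih =>
    intro a b e hn hfo hp
    match a, b with
    | [], b => exact absurd (Or.inl (List.nil_prefix)) hp
    | x :: as, [] => exact absurd (Or.inr (List.nil_prefix)) hp
    | x :: as, y :: bs =>
      by_cases hxy : x = y
      · subst hxy
        rw [goB, if_pos rfl]
        refine ih _ (by simp at hn; omega) as bs e rfl hfo (fun h => hp ?_)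
        rcases h with h | h
        · exact Or.inl (List.cons_prefix_cons.mpr ⟨rfl, h⟩)
        · exact Or.inr (List.cons_prefix_cons.mpr ⟨rfl, h⟩)
      · rw [goB, if_neg hxy, if_pos (by omega)]

lemma drop_eraseIdx_self (f : List Char) (i : Nat) (h : i ≤ f.length) :
    (f.eraseIdx i).drop i = f.drop (i + 1) := by
  rw [List.eraseIdx_eq_take_drop_succ, List.drop_left' (by simp [List.length_take]; omega)]

lemma take_eraseIdx_self (f : List Char) (i : Nat) (h : i ≤ f.length) :
    (f.eraseIdx i).take i = f.take i := by
  rw [List.eraseIdx_eq_take_drop_succ, List.take_left' (by simp [List.length_take]; omega)]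

-- main correspondence: A's mutating loop equals goB on the current suffixes, within budget
lemma loopA_eq_goB (fo : Int) : ∀ fuel (f s : List Char) (i : Nat) (e : Int),
    f.length + s.length - i < fuel → i ≤ f.length → i ≤ s.length → f.take i = s.take i →
    e ≤ fo → frameshiftLoopA fuel f s e i fo = goB (f.drop i) (s.drop i) e fo := by
  intro fuel
  induction fuel with
  | zero => intro f s i e hn; omega
  | succ fuel ih =>
    intro f s i e hn hif his htk he
    rw [frameshiftLoopA]
    by_cases hg : (i : Int) > (s.length : Int) - 1 ∨ (i : Int) > (f.length : Int) - 1
    · -- loop exit: i = min length, so longer[:len(shorter)] == shorter holds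
      rw [if_pos hg]
      have hmin : i = s.length ∨ i = f.length := by rcases hg with h | h <;> omega
      have h1 : (f.drop i).length = f.length - i := List.length_drop ..
      have h2 : (s.drop i).length = s.length - i := List.length_drop ..
      rw [goB_not_both _ _ _ _ (by rw [← List.length_eq_zero_iff, ← List.length_eq_zero_iff]; omega)]
      unfold frameshiftFinalA
      rcases lt_trichotomy f.length s.length with hlt | heq | hgt
      · -- s is longer, i = f.length
        have hi : i = f.length := by omega
        have htake : s.take f.length = f := by
          rw [← hi, ← htk, hi, List.take_length]
        rw [if_neg (by omega : ¬ f.length > s.length), if_pos hlt]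
        simp only [htake, true_and]
        rw [h1, h2]
        split_ifs <;> first | rfl | omega
      · -- equal lengths, i = both
        have hi : i = s.length := by omega
        rw [if_neg (by omega : ¬ f.length > s.length), if_neg (by omega : ¬ f.length < s.length)]
        simp only [List.take_length, true_and]
        rw [h1, h2]
        split_ifs <;> first | rfl | omega
      · -- f is longer, i = s.length
        have hi : i = s.length := by omega
        have htake : f.take s.length = s := by
          rw [← hi, htk, hi, List.take_length]
        rw [if_pos hgt, if_neg (by omega : ¬ f.length < s.length)]
        simp only [htake, true_and]
        rw [h1, h2]
        split_ifs <;> first | rfl | omega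
    · rw [if_neg hg]
      have hi : i < f.length := by omega
      have hj : i < s.length := by omega
      have hdf := List.drop_eq_getElem_cons hi
      have hdsj := List.drop_eq_getElem_cons hj
      by_cases hne : f[i]? = s[i]?
      · -- characters match: A's errors/equality checks, then advance
        rw [if_neg (by simp [hne])]
        have hchar : f[i]'hi = s[i]'hj := by
          rw [List.getElem?_eq_getElem hi, List.getElem?_eq_getElem hj] at hne
          simpa using hne
        rw [if_neg (by omega)]
        by_cases heq : f = s
        · rw [if_pos heq]
          subst heq
          exact (goB_self fo (f.drop i) e he).symm
        · rw [if_neg heq]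
          rw [ih f s (i+1) e (by omega) (by omega) (by omega)
              (by rw [List.take_add_one, List.take_add_one, htk, List.getElem?_eq_getElem hi,
                      List.getElem?_eq_getElem hj, hchar])
              he]
          rw [hdf, hdsj, goB, if_pos hchar]
      · -- mismatch: A pops the longer list; goB advances past the longer suffix's head
        rw [if_pos hne]
        have hchar : ¬ f[i]'hi = s[i]'hj := by
          rw [List.getElem?_eq_getElem hi, List.getElem?_eq_getElem hj] at hne
          simpa using hne
        rw [hdf, hdsj, goB, if_neg hchar]
        by_cases hb : e + 1 > fo
        · simp [hb]
        · rw [if_neg hb, if_neg hb]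
          have hlf : (f.drop (i+1)).length = f.length - (i+1) := List.length_drop ..
          have hls : (s.drop (i+1)).length = s.length - (i+1) := List.length_drop ..
          by_cases hc : f.length > s.length
          · -- pop from f
            simp only [if_pos hc]
            have hlen' : (f.eraseIdx i).length = f.length - 1 := by
              rw [List.length_eraseIdx, if_pos hi]
            have htk' : (f.eraseIdx i).take i = s.take i := by
              rw [take_eraseIdx_self f i (le_of_lt hi)]; exact htk
            have hrec : frameshiftLoopA fuel (f.eraseIdx i) s (e+1) i fo
                = goB ((f.eraseIdx i).drop i) (s.drop i) (e+1) fo :=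
              ih (f.eraseIdx i) s i (e+1) (by rw [hlen']; omega) (by rw [hlen']; omega)
                (by omega) htk' (by omega)
            rw [drop_eraseIdx_self f i (le_of_lt hi)] at hrec
            conv_rhs => rw [if_pos (show (f.drop (i+1)).length + 1 > (s.drop (i+1)).length + 1 by
              rw [hlf, hls]; omega)]
            rw [← hdsj]
            by_cases hps : f.eraseIdx i = s
            · rw [if_pos hps]
              rw [← hps] at hrec ⊢
              rw [← drop_eraseIdx_self f i (le_of_lt hi),
                  goB_self fo ((f.eraseIdx i).drop i) (e+1) (by omega)]
            · rw [if_neg hps, hrec]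
          · -- pop from s
            simp only [if_neg hc]
            have hlen' : (s.eraseIdx i).length = s.length - 1 := by
              rw [List.length_eraseIdx, if_pos hj]
            have htk' : f.take i = (s.eraseIdx i).take i := by
              rw [take_eraseIdx_self s i (le_of_lt hj)]; exact htk
            have hrec : frameshiftLoopA fuel f (s.eraseIdx i) (e+1) i fo
                = goB (f.drop i) ((s.eraseIdx i).drop i) (e+1) fo :=
              ih f (s.eraseIdx i) i (e+1) (by rw [hlen']; omega) (by omega)
                (by rw [hlen']; omega) htk' (by omega)
            rw [drop_eraseIdx_self s i (le_of_lt hj)] at hrec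
            conv_rhs => rw [if_neg (show ¬((f.drop (i+1)).length + 1 > (s.drop (i+1)).length + 1) by
              rw [hlf, hls]; omega)]
            rw [← hdf]
            by_cases hps : f = s.eraseIdx i
            · rw [if_pos hps]
              rw [hps] at hrec ⊢
              rw [← drop_eraseIdx_self s i (le_of_lt hj),
                  goB_self fo ((s.eraseIdx i).drop i) (e+1) (by omega)]
            · rw [if_neg hps, hrec]

lemma lower_toList_eq_nil (s : String) : (PySem.Str.lower s).toList = [] ↔ s = "" := by
  simp [PySem.Str.toList_lower, PySem.Chars.lower]

-- with a negative budget, A returns False as soon as both current lists are nonempty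
lemma loopA_neg (fuel : Nat) (f s : List Char) (fo : Int) (hfo : fo < 0) (hf : f ≠ []) (hs : s ≠ []) :
    frameshiftLoopA (fuel + 1) f s 0 0 fo = some false := by
  have hf1 : 1 ≤ f.length := List.length_pos_iff.mpr hf
  have hs1 : 1 ≤ s.length := List.length_pos_iff.mpr hs
  rw [frameshiftLoopA, if_neg (by push_cast; omega)]
  by_cases hne : f[0]? = s[0]?
  · rw [if_neg (by simp [hne]), if_pos (by omega)]
  · rw [if_pos hne, if_pos (by omega)]

lemma loopA_goB_total (F S : List Char) (fo : Int)
    (h : 0 ≤ fo ∨ F = [] ∨ S = [] ∨ ¬(F <+: S ∨ S <+: F)) :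
    frameshiftLoopA (F.length + S.length + 1) F S 0 0 fo = goB F S 0 fo := by
  by_cases hfo : 0 ≤ fo
  · have := loopA_eq_goB fo (F.length + S.length + 1) F S 0 0 (by omega)
      (Nat.zero_le _) (Nat.zero_le _) rfl hfo
    simpa using this
  · rcases h with h | hF | hS | hnp
    · omega
    · subst hF
      rw [frameshiftLoopA, if_pos (by right; norm_num)]
      rw [goB_not_both _ _ _ _ (Or.inl rfl)]
      unfold frameshiftFinalA
      cases S <;> simp
    · subst hS
      rw [frameshiftLoopA, if_pos (by left; norm_num)]
      rw [goB_not_both _ _ _ _ (Or.inr rfl)]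
      unfold frameshiftFinalA
      cases F <;> simp
    · have hF : F ≠ [] := by rintro rfl; exact hnp (Or.inl List.nil_prefix)
      have hS : S ≠ [] := by rintro rfl; exact hnp (Or.inr List.nil_prefix)
      rw [loopA_neg _ _ _ fo (by omega) hF hS, goB_nopref fo _ _ _ 0 rfl (by omega) hnp]

-- ===== VERDICT (by name: the statement is the Claim_ definition above) =====
theorem frameshift_match_spec : Claim_unchanged_frameshift_match := by
  intro first second fo _hdom hnD
  unfold frameshift_match frameshift_match_alt
  rw [loopB_eq_goB fo _ _ _ 0 0 0 (by omega)]
  simp only [List.drop_zero]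
  apply loopA_goB_total
  by_cases hfo : 0 ≤ fo
  · exact Or.inl hfo
  · by_cases hf : (PySem.Str.lower first).toList = []
    · exact Or.inr (Or.inl hf)
    · by_cases hs : (PySem.Str.lower second).toList = []
      · exact Or.inr (Or.inr (Or.inl hs))
      · refine Or.inr (Or.inr (Or.inr (fun hp => hnD ?_)))
        exact ⟨by omega, fun h => hf ((lower_toList_eq_nil first).mpr h),
          fun h => hs ((lower_toList_eq_nil second).mpr h), hp⟩

theorem frameshift_match_changed : Claim_changed_frameshift_match := by
  unfold Claim_changed_frameshift_match; decide

theorem frameshift_match_tight : Claim_exact_frameshift_match := by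
  intro first second fo _hdom hD
  obtain ⟨hfo, hf, hs, hp⟩ := hD
  have hf' : (PySem.Str.lower first).toList ≠ [] := fun h => hf ((lower_toList_eq_nil first).mp h)
  have hs' : (PySem.Str.lower second).toList ≠ [] := fun h => hs ((lower_toList_eq_nil second).mp h)
  unfold frameshift_match frameshift_match_alt
  rw [loopA_neg _ _ _ fo (by omega) hf' hs',
      loopB_eq_goB fo _ _ _ 0 0 0 (by omega)]
  simp only [List.drop_zero]
  rw [goB_pref fo _ _ _ 0 rfl (by omega) hp]
  simp
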